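-- pv_equiv track=rewrite | github.com/kkr010128/codebert | problem021/problem021_151.py | count_pond
-- ===== SOURCE A (Python) =====
-- def count_pond(FB):
--
--     P = []
--
--     is_pond = False
--     count = 0
--     amount = 0
--     all_amount = 0
--     for i in range(len(FB)):
--         all_amount += FB[i]
--         if is_pond:  # 池の途中
--             amount += FB[i]
--             if FB[i] == 1:
--                 is_pond = False  # ここで一旦終了
--                 P.append(amount//2)
--         else:  # 池でなくなった場合
--             if FB[i] == 0: continue
--             count += 1
--             is_pond = True
--             amount = FB[i]
--
--     return all_amount//2, count, P
-- ===== SOURCE B (Python) =====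
-- def count_pond(FB):
--     # Staged approach: prefix sums + precomputed index lists of nonzeros and ones;
--     # pond amounts come from prefix-sum differences, not per-element accumulation.
--     n = len(FB)
--     pre = [0] * (n + 1)
--     for i in range(n):
--         pre[i + 1] = pre[i] + FB[i]
--     ones = [i for i in range(n) if FB[i] == 1]
--     nz = [i for i in range(n) if FB[i] != 0]
--     count = 0
--     P = []
--     p = 0
--     zi = 0
--     oi = 0
--     while True:
--         while zi < len(nz) and nz[zi] < p:
--             zi += 1
--         if zi == len(nz):
--             break
--         s = nz[zi]
--         zi += 1
--         count += 1
--         while oi < len(ones) and ones[oi] <= s: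
--             oi += 1
--         if oi == len(ones):
--             break
--         j = ones[oi]
--         oi += 1
--         P.append((pre[j + 1] - pre[s]) // 2)
--         p = j + 1
--     return pre[n] // 2, count, P
-- ===== Notes on version B (the rewrite author's own statement) =====
-- stated objective: alternative
-- what changed: Replaces A's single-pass boolean state machine with a staged algorithm: build a prefix-sum array plus precomputed index lists of nonzero elements and of ones, then walk the two index lists with pointers, computing each pond's amount as a prefix-sum difference instead of accumulating it element by element.
import Mathlib
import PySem

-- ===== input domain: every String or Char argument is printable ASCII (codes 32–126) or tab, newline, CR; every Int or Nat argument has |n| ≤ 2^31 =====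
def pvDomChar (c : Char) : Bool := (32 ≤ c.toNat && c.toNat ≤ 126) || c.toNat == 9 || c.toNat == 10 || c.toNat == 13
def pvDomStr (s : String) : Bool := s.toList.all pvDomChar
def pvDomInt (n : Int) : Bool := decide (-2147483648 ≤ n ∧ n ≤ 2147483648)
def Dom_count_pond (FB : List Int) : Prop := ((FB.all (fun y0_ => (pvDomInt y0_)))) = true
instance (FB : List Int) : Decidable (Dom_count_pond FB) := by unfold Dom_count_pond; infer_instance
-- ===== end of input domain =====

-- B stages the work: prefix sums plus precomputed index lists of nonzeros and ones,
-- pond amounts read off as prefix-sum differences (objective: alternative, same cost).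

-- ===== PORT A =====
-- state: (is_pond, count, amount, all_amount, P)
def pondStepA (s : Bool × Int × Int × Int × List Int) (x : Int) :
    Bool × Int × Int × Int × List Int :=
  let all := s.2.2.2.1 + x
  if s.1 then
    let amt := s.2.2.1 + x
    if x = 1 then (false, s.2.1, amt, all, s.2.2.2.2 ++ [PySem.Int.floordiv amt 2])
    else (true, s.2.1, amt, all, s.2.2.2.2)
  else
    if x = 0 then (s.1, s.2.1, s.2.2.1, all, s.2.2.2.2)
    else (true, s.2.1 + 1, x, all, s.2.2.2.2)

def count_pond (FB : List Int) : Int × Int × List Int :=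
  let s := FB.foldl pondStepA (false, 0, 0, 0, [])
  (PySem.Int.floordiv s.2.2.2.1 2, s.2.1, s.2.2.2.2)

-- ===== PORT B =====
-- `pre[i+1] = pre[i] + FB[i]` loop: builds [0, x0, x0+x1, ...]
def prefGo (acc : Int) : List Int → List Int
  | [] => [acc]
  | x :: r => acc :: prefGo (acc + x) r

-- `while zi < len(nz) and nz[zi] < p: zi += 1` — pointer advance = dropping a prefix
def dropLt (p : Nat) : List Nat → List Nat
  | [] => []
  | i :: r => if i < p then dropLt p r else i :: r

-- `while oi < len(ones) and ones[oi] <= s: oi += 1`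
def dropLe (s : Nat) : List Nat → List Nat
  | [] => []
  | i :: r => if i ≤ s then dropLe s r else i :: r

theorem dropLt_length_le (p : Nat) (l : List Nat) : (dropLt p l).length ≤ l.length := by
  induction l with
  | nil => simp [dropLt]
  | cons i r ih =>
      by_cases h : i < p
      · rw [show dropLt p (i :: r) = dropLt p r from by simp [dropLt, h]]
        exact Nat.le_succ_of_le ih
      · simp [dropLt, h]

-- outer `while True` loop of B (pointers into nz/ones carried as the remaining suffixes)
def pondLoop (pre : List Int) (p : Nat) (nz ones : List Nat) : Int × List Int :=
  match hm : dropLt p nz with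
  | [] => (0, [])
  | s :: nz' =>
    match dropLe s ones with
    | [] => (1, [])
    | j :: ones' =>
      let r := pondLoop pre (j + 1) nz' ones'
      (r.1 + 1, PySem.Int.floordiv (pre.getD (j + 1) 0 - pre.getD s 0) 2 :: r.2)
termination_by nz.length
decreasing_by
  have := dropLt_length_le p nz
  rw [hm] at this; simp at this; omega

def count_pond_alt (FB : List Int) : Int × Int × List Int :=
  let n := FB.length
  let pre := prefGo 0 FB
  -- indices are valid (i < n), so FB[i] is FB.getD i 0
  let ones := (List.range n).filter (fun i => FB.getD i 0 = 1)
  let nz := (List.range n).filter (fun i => FB.getD i 0 ≠ 0)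
  let r := pondLoop pre 0 nz ones
  (PySem.Int.floordiv (pre.getD n 0) 2, r.1, r.2)

-- ===== PRECONDITION & SPEC =====
def Spec_count_pond (FB : List Int) (out : Int × Int × List Int) : Prop := out = count_pond_alt FB
instance (FB : List Int) (out : Int × Int × List Int) : Decidable (Spec_count_pond FB out) := by unfold Spec_count_pond; infer_instance

-- ===== CLAIM =====
def Claim_equal_count_pond : Prop := ∀ (FB : List Int), Dom_count_pond FB → Spec_count_pond FB (count_pond FB)

-- ===== LEMMAS AND PROOFS =====

-- common functional specification: ponds by direct recursion over the values
mutual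
def pondScan : List Int → Int × List Int
  | [] => (0, [])
  | x :: rest =>
      if x = 0 then pondScan rest
      else
        let r := pondConsume x rest
        (r.1 + 1, r.2)
  termination_by l => l.length
def pondConsume (amt : Int) : List Int → Int × List Int
  | [] => (0, [])
  | y :: rest =>
      if y = 1 then
        let r := pondScan rest
        (r.1, PySem.Int.floordiv (amt + 1) 2 :: r.2)
      else pondConsume (amt + y) rest
  termination_by l => l.length
end

-- A's fold equals the functional spec (joint invariant, strong induction on length)
theorem pond_fold_char (n : Nat) :
    ∀ (l : List Int), l.length ≤ n →
      (∀ (c amt all : Int) (P : List Int), ∃ b a,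
        List.foldl pondStepA (false, c, amt, all, P) l =
          (b, c + (pondScan l).1, a, all + l.sum, P ++ (pondScan l).2)) ∧
      (∀ (c amt all : Int) (P : List Int), ∃ b a,
        List.foldl pondStepA (true, c, amt, all, P) l =
          (b, c + (pondConsume amt l).1, a, all + l.sum, P ++ (pondConsume amt l).2)) := by
  induction n with
  | zero =>
      intro l hl
      have hnil : l = [] := List.eq_nil_of_length_eq_zero (Nat.le_zero.mp hl)
      subst hnil
      refine ⟨fun c amt all P => ⟨false, amt, ?_⟩, fun c amt all P => ⟨true, amt, ?_⟩⟩ <;>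
        simp [pondScan, pondConsume]
  | succ n ih =>
      intro l hl
      cases l with
      | nil =>
          refine ⟨fun c amt all P => ⟨false, amt, ?_⟩, fun c amt all P => ⟨true, amt, ?_⟩⟩ <;>
            simp [pondScan, pondConsume]
      | cons x rest =>
          have hr : rest.length ≤ n := by simpa using Nat.succ_le_succ_iff.mp hl
          constructor
          · intro c amt all P
            by_cases hx : x = 0
            · subst hx
              have hstep : pondStepA (false, c, amt, all, P) 0 = (false, c, amt, all + 0, P) := by
                simp [pondStepA]
              obtain ⟨b, a, h⟩ := (ih rest hr).1 c amt (all + 0) P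
              refine ⟨b, a, ?_⟩
              rw [List.foldl_cons, hstep, h]
              simp [pondScan]
            · have hstep : pondStepA (false, c, amt, all, P) x = (true, c + 1, x, all + x, P) := by
                simp [pondStepA, hx]
              obtain ⟨b, a, h⟩ := (ih rest hr).2 (c + 1) x (all + x) P
              refine ⟨b, a, ?_⟩
              rw [List.foldl_cons, hstep, h]
              simp only [pondScan, if_neg hx, List.sum_cons, Prod.mk.injEq]
              and_intros <;> first | ring | simp
          · intro c amt all P
            by_cases hy : x = 1
            · subst hy
              have hstep : pondStepA (true, c, amt, all, P) 1 =
                  (false, c, amt + 1, all + 1, P ++ [PySem.Int.floordiv (amt + 1) 2]) := by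
                simp [pondStepA]
              obtain ⟨b, a, h⟩ :=
                (ih rest hr).1 c (amt + 1) (all + 1) (P ++ [PySem.Int.floordiv (amt + 1) 2])
              refine ⟨b, a, ?_⟩
              have hc : pondConsume amt (1 :: rest) =
                  ((pondScan rest).1, PySem.Int.floordiv (amt + 1) 2 :: (pondScan rest).2) := by
                rw [pondConsume]; norm_num
              rw [List.foldl_cons, hstep, h, hc]
              simp only [List.sum_cons, Prod.mk.injEq]
              and_intros
              all_goals try ring
              all_goals simp [List.append_assoc]
            · have hstep : pondStepA (true, c, amt, all, P) x = (true, c, amt + x, all + x, P) := by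
                simp [pondStepA, hy]
              obtain ⟨b, a, h⟩ := (ih rest hr).2 c (amt + x) (all + x) P
              refine ⟨b, a, ?_⟩
              rw [List.foldl_cons, hstep, h]
              simp only [pondConsume, if_neg hy, List.sum_cons, Prod.mk.injEq]
              and_intros <;> first | ring | simp

-- B-side helper for the proof: sorted index list of positions ≥ t satisfying pred
def idxFrom (FB : List Int) (pred : Int → Bool) (t : Nat) : List Nat :=
  if _h : t < FB.length then
    if pred (FB.getD t 0) then t :: idxFrom FB pred (t + 1) else idxFrom FB pred (t + 1)
  else []
termination_by FB.length - t

theorem idxFrom_eq_filter_range' (FB : List Int) (pred : Int → Bool) :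
    ∀ k t, FB.length - t ≤ k →
      idxFrom FB pred t = (List.range' t (FB.length - t)).filter (fun i => pred (FB.getD i 0)) := by
  intro k
  induction k with
  | zero =>
      intro t ht
      have h : ¬ t < FB.length := by omega
      rw [idxFrom]
      simp [h, Nat.sub_eq_zero_of_le (by omega : FB.length ≤ t)]
  | succ k ih =>
      intro t ht
      by_cases h : t < FB.length
      · have hlen : FB.length - t = (FB.length - (t + 1)) + 1 := by omega
        rw [idxFrom, dif_pos h, ih (t + 1) (by omega), hlen, List.range'_succ,
          List.filter_cons]
      · rw [idxFrom]
        simp [h, Nat.sub_eq_zero_of_le (by omega : FB.length ≤ t)]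

theorem idxFrom_zero (FB : List Int) (pred : Int → Bool) :
    idxFrom FB pred 0 = (List.range FB.length).filter (fun i => pred (FB.getD i 0)) := by
  rw [idxFrom_eq_filter_range' FB pred FB.length 0 (by omega), List.range_eq_range']
  simp

theorem mem_idxFrom (FB : List Int) (pred : Int → Bool) (t x : Nat) :
    x ∈ idxFrom FB pred t ↔ (t ≤ x ∧ x < FB.length ∧ pred (FB.getD x 0)) := by
  rw [idxFrom_eq_filter_range' FB pred (FB.length - t) t le_rfl]
  simp only [List.mem_filter, List.mem_range']
  constructor
  · rintro ⟨⟨i, hi, hx⟩, hp⟩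
    exact ⟨by omega, by omega, hp⟩
  · rintro ⟨h1, h2, h3⟩
    exact ⟨⟨x - t, by omega, by omega⟩, h3⟩

theorem dropLt_of_all_ge (p : Nat) (l : List Nat) (h : ∀ x ∈ l, p ≤ x) : dropLt p l = l := by
  cases l with
  | nil => rfl
  | cons i r =>
      have : ¬ i < p := by have := h i (by simp); omega
      simp [dropLt, this]

theorem dropLt_idxFrom (FB : List Int) (pred : Int → Bool) :
    ∀ k t p, t ≤ p → p - t ≤ k → dropLt p (idxFrom FB pred t) = idxFrom FB pred p := by
  intro k
  induction k with
  | zero =>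
      intro t p h1 h2
      have : t = p := by omega
      subst this
      exact dropLt_of_all_ge _ _ (fun x hx => ((mem_idxFrom _ _ _ _).mp hx).1)
  | succ k ih =>
      intro t p h1 h2
      by_cases he : t = p
      · subst he
        exact dropLt_of_all_ge _ _ (fun x hx => ((mem_idxFrom _ _ _ _).mp hx).1)
      · have ht : t < p := by omega
        rw [idxFrom]
        by_cases h : t < FB.length
        · rw [dif_pos h]
          by_cases hp : pred (FB.getD t 0) = true
          · rw [if_pos hp]
            simp only [dropLt, if_pos ht]
            exact ih (t + 1) p (by omega) (by omega)
          · rw [if_neg hp]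
            exact ih (t + 1) p (by omega) (by omega)
        · simp [h]
          have : idxFrom FB pred p = [] := by
            rw [idxFrom]; simp; omega
          simp [this, dropLt]
  
theorem dropLe_eq_dropLt (s : Nat) (l : List Nat) : dropLe s l = dropLt (s + 1) l := by
  induction l with
  | nil => rfl
  | cons i r ih =>
      by_cases h : i ≤ s
      · simp [dropLe, dropLt, h, Nat.lt_succ_of_le h, ih]
      · simp [dropLe, dropLt, h]

theorem idxFrom_cons (FB : List Int) (pred : Int → Bool) :
    ∀ k t s rest, FB.length - t ≤ k → idxFrom FB pred t = s :: rest →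
      t ≤ s ∧ s < FB.length ∧ pred (FB.getD s 0) = true ∧ rest = idxFrom FB pred (s + 1) ∧
        (∀ i, t ≤ i → i < s → pred (FB.getD i 0) = false) := by
  intro k
  induction k with
  | zero =>
      intro t s rest ht heq
      rw [idxFrom] at heq
      have : ¬ t < FB.length := by omega
      simp [this] at heq
  | succ k ih =>
      intro t s rest ht heq
      rw [idxFrom] at heq
      by_cases h : t < FB.length
      · rw [dif_pos h] at heq
        by_cases hp : pred (FB.getD t 0)
        · rw [if_pos hp] at heq
          injection heq with he1 he2
          subst he1; subst he2
          exact ⟨le_rfl, h, by simpa using hp, rfl, fun i hi1 hi2 => absurd hi1 (by omega)⟩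
        · rw [if_neg hp] at heq
          obtain ⟨h1, h2, h3, h4, h5⟩ := ih (t + 1) s rest (by omega) heq
          refine ⟨by omega, h2, h3, h4, fun i hi1 hi2 => ?_⟩
          by_cases hit : i = t
          · subst hit; simpa using hp
          · exact h5 i (by omega) hi2
      · simp [h] at heq

-- prefix-sum list facts
theorem prefGo_getD : ∀ (l : List Int) (acc : Int) (k : Nat), k ≤ l.length →
    (prefGo acc l).getD k 0 = acc + (l.take k).sum := by
  intro l
  induction l with
  | nil =>
      intro acc k hk
      have : k = 0 := by simpa using hk
      subst this; simp [prefGo]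
  | cons x r ih =>
      intro acc k hk
      cases k with
      | zero => simp [prefGo]
      | succ k =>
          simp only [prefGo, List.getD_cons_succ, List.take_succ_cons, List.sum_cons]
          rw [ih (acc + x) k (by simpa using Nat.succ_le_succ_iff.mp hk)]
          ring

theorem take_succ_sum (FB : List Int) (i : Nat) (h : i < FB.length) :
    (FB.take (i + 1)).sum = (FB.take i).sum + FB.getD i 0 := by
  rw [List.getD_eq_getElem _ _ h]
  exact List.sum_take_succ FB i h

-- spec-side: skipping zeros
theorem pondScan_skip (FB : List Int) :
    ∀ k p s, s - p ≤ k → p ≤ s → s ≤ FB.length →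
      (∀ i, p ≤ i → i < s → FB.getD i 0 = 0) →
      pondScan (FB.drop p) = pondScan (FB.drop s) := by
  intro k
  induction k with
  | zero =>
      intro p s h1 h2 _ _
      have hps : p = s := by omega
      rw [hps]
  | succ k ih =>
      intro p s h1 h2 h3 h4
      by_cases he : p = s
      · rw [he]
      · have hp : p < FB.length := by omega
        have hd : FB.drop p = FB.getD p 0 :: FB.drop (p + 1) := by
          rw [List.drop_eq_getElem_cons hp, List.getD_eq_getElem _ _ hp]
        rw [hd, pondScan, if_pos (h4 p le_rfl (by omega))]
        exact ih (p + 1) s (by omega) (by omega) h3 (fun i hi1 hi2 => h4 i (by omega) hi2)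

-- spec-side: a pond that never closes
theorem pondConsume_no_one (FB : List Int) :
    ∀ k q amt, FB.length - q ≤ k →
      (∀ i, q ≤ i → i < FB.length → FB.getD i 0 ≠ 1) →
      pondConsume amt (FB.drop q) = (0, []) := by
  intro k
  induction k with
  | zero =>
      intro q amt h1 _
      rw [List.drop_eq_nil_of_le (by omega)]
      simp [pondConsume]
  | succ k ih =>
      intro q amt h1 h2
      by_cases hq : q < FB.length
      · have hd : FB.drop q = FB.getD q 0 :: FB.drop (q + 1) := by
          rw [List.drop_eq_getElem_cons hq, List.getD_eq_getElem _ _ hq]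
        rw [hd, pondConsume, if_neg (h2 q le_rfl hq)]
        exact ih (q + 1) _ (by omega) (fun i hi1 hi2 => h2 i (by omega) hi2)
      · rw [List.drop_eq_nil_of_le (by omega)]
        simp [pondConsume]

-- spec-side: a pond closing at index j, amount via prefix sums
theorem pondConsume_close (FB : List Int) (j : Nat) (hj : j < FB.length)
    (hone : FB.getD j 0 = 1) :
    ∀ k q amt, j - q ≤ k → q ≤ j →
      (∀ i, q ≤ i → i < j → FB.getD i 0 ≠ 1) →
      pondConsume amt (FB.drop q) =
        ((pondScan (FB.drop (j + 1))).1,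
          PySem.Int.floordiv (amt + ((FB.take (j + 1)).sum - (FB.take q).sum)) 2 ::
            (pondScan (FB.drop (j + 1))).2) := by
  have hone' : FB[j] = 1 := by rw [← List.getD_eq_getElem _ _ hj]; exact hone
  intro k
  induction k with
  | zero =>
      intro q amt h1 h2 _
      have hqj : q = j := by omega
      rw [hqj]
      have hd : FB.drop j = FB.getD j 0 :: FB.drop (j + 1) := by
        rw [List.drop_eq_getElem_cons hj, List.getD_eq_getElem _ _ hj]
      rw [hd, hone, pondConsume]
      simp [take_succ_sum FB j hj, List.getElem?_eq_getElem hj, hone']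
  | succ k ih =>
      intro q amt h1 h2 h3
      by_cases he : q = j
      · subst he
        have hd : FB.drop q = FB.getD q 0 :: FB.drop (q + 1) := by
          rw [List.drop_eq_getElem_cons hj, List.getD_eq_getElem _ _ hj]
        rw [hd, hone, pondConsume]
        simp [take_succ_sum FB q hj, List.getElem?_eq_getElem hj, hone']
      · have hq : q < j := by omega
        have hqn : q < FB.length := by omega
        have hd : FB.drop q = FB.getD q 0 :: FB.drop (q + 1) := by
          rw [List.drop_eq_getElem_cons hqn, List.getD_eq_getElem _ _ hqn]
        rw [hd, pondConsume, if_neg (h3 q le_rfl hq),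
          ih (q + 1) (amt + FB.getD q 0) (by omega) (by omega)
            (fun i hi1 hi2 => h3 i (by omega) hi2)]
        rw [take_succ_sum FB q hqn]
        ring_nf

-- unfolding equations for pondLoop's dependent matches
theorem pondLoop_eq_nil (pre : List Int) (p : Nat) (nz ones : List Nat)
    (h : dropLt p nz = []) : pondLoop pre p nz ones = (0, []) := by
  rw [pondLoop]
  split <;> simp_all

theorem pondLoop_eq_open (pre : List Int) (p : Nat) (nz ones : List Nat) (s : Nat)
    (nz' : List Nat) (h : dropLt p nz = s :: nz') (h2 : dropLe s ones = []) :
    pondLoop pre p nz ones = (1, []) := by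
  rw [pondLoop]
  split <;> simp_all

theorem pondLoop_eq_close (pre : List Int) (p : Nat) (nz ones : List Nat) (s j : Nat)
    (nz' ones' : List Nat) (h : dropLt p nz = s :: nz') (h2 : dropLe s ones = j :: ones') :
    pondLoop pre p nz ones =
      ((pondLoop pre (j + 1) nz' ones').1 + 1,
        PySem.Int.floordiv (pre.getD (j + 1) 0 - pre.getD s 0) 2 ::
          (pondLoop pre (j + 1) nz' ones').2) := by
  rw [pondLoop]
  split <;> simp_all

-- main B-side correspondence: pondLoop on the index lists = pondScan on the value suffix
theorem pondLoop_eq_pondScan (FB : List Int) :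
    ∀ k p t, FB.length - p ≤ k → t ≤ p →
      pondLoop (prefGo 0 FB) p (idxFrom FB (fun x => x ≠ 0) t)
          (idxFrom FB (fun x => x = 1) p) = pondScan (FB.drop p) := by
  intro k
  induction k with
  | zero =>
      intro p t h1 h2
      have hn : FB.length ≤ p := by omega
      have hz : idxFrom FB (fun x => x ≠ 0) p = [] := by rw [idxFrom]; simp; omega
      rw [pondLoop_eq_nil _ _ _ _ (by rw [dropLt_idxFrom FB _ (p - t) t p h2 le_rfl, hz]),
        List.drop_eq_nil_of_le hn]
      simp [pondScan]
  | succ k ih =>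
      intro p t h1 h2
      have hdrop : dropLt p (idxFrom FB (fun x => x ≠ 0) t) = idxFrom FB (fun x => x ≠ 0) p :=
        dropLt_idxFrom FB _ (p - t) t p h2 le_rfl
      cases hnz : idxFrom FB (fun x => x ≠ 0) p with
      | nil =>
          have hall : ∀ i, p ≤ i → i < FB.length → FB.getD i 0 = 0 := by
            intro i hi1 hi2
            by_contra hne
            have hmem : i ∈ idxFrom FB (fun x => x ≠ 0) p :=
              (mem_idxFrom _ _ _ _).mpr ⟨hi1, hi2, decide_eq_true hne⟩
            rw [hnz] at hmem
            simp at hmem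
          rw [pondLoop_eq_nil _ _ _ _ (by rw [hdrop, hnz])]
          by_cases hpl : p ≤ FB.length
          · rw [pondScan_skip FB (FB.length - p) p FB.length (by omega) hpl le_rfl hall,
              List.drop_length]
            simp [pondScan]
          · rw [List.drop_eq_nil_of_le (by omega)]
            simp [pondScan]
      | cons s nz' =>
          obtain ⟨hps, hsn, hsnz, hnz', hzeros⟩ :=
            idxFrom_cons FB _ (FB.length - p) p s nz' le_rfl hnz
          have hsnz' : FB.getD s 0 ≠ 0 := by simpa using hsnz
          have hscan : pondScan (FB.drop p) = pondScan (FB.drop s) :=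
            pondScan_skip FB (s - p) p s le_rfl hps (by omega)
              (fun i h1 h2 => by simpa using hzeros i h1 h2)
          have hd : FB.drop s = FB.getD s 0 :: FB.drop (s + 1) := by
            rw [List.drop_eq_getElem_cons hsn, List.getD_eq_getElem _ _ hsn]
          have hdrop2 : dropLe s (idxFrom FB (fun x => x = 1) p) =
              idxFrom FB (fun x => x = 1) (s + 1) := by
            rw [dropLe_eq_dropLt]
            exact dropLt_idxFrom FB _ (s + 1 - p) p (s + 1) (by omega) le_rfl
          cases hone : idxFrom FB (fun x => x = 1) (s + 1) with
          | nil =>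
              have hno1 : ∀ i, s + 1 ≤ i → i < FB.length → FB.getD i 0 ≠ 1 := by
                intro i hi1 hi2 hc
                have : i ∈ idxFrom FB (fun x => x = 1) (s + 1) :=
                  (mem_idxFrom _ _ _ _).mpr ⟨hi1, hi2, decide_eq_true hc⟩
                rw [hone] at this
                simp at this
              rw [pondLoop_eq_open _ _ _ _ _ _ (by rw [hdrop, hnz]) (by rw [hdrop2, hone]),
                hscan, hd, pondScan, if_neg hsnz',
                pondConsume_no_one FB (FB.length - (s + 1)) (s + 1) _ le_rfl hno1]
              simp
          | cons j ones' =>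
              obtain ⟨hsj, hjn, hj1, hones', hno1⟩ :=
                idxFrom_cons FB _ (FB.length - (s + 1)) (s + 1) j ones' le_rfl hone
              have hj1' : FB.getD j 0 = 1 := by simpa using hj1
              have hcl := pondConsume_close FB j hjn hj1' (j - (s + 1)) (s + 1) (FB.getD s 0)
                le_rfl hsj (fun i hA hB hc => by
                  have hfalse := hno1 i hA hB
                  rw [decide_eq_true hc] at hfalse
                  cases hfalse)
              rw [pondLoop_eq_close _ _ _ _ _ _ _ _ (by rw [hdrop, hnz])
                  (by rw [hdrop2, hone]),
                hscan, hd, pondScan, if_neg hsnz', hcl]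
              rw [hnz', hones', ih (j + 1) (s + 1) (by omega) (by omega)]
              have hpre1 : (prefGo 0 FB).getD (j + 1) 0 = (FB.take (j + 1)).sum := by
                rw [prefGo_getD FB 0 (j + 1) (by omega)]; ring
              have hpre2 : (prefGo 0 FB).getD s 0 = (FB.take s).sum := by
                rw [prefGo_getD FB 0 s (by omega)]; ring
              have hamt : (FB.take (j + 1)).sum - (FB.take s).sum =
                  FB.getD s 0 + ((FB.take (j + 1)).sum - (FB.take (s + 1)).sum) := by
                rw [take_succ_sum FB s hsn]; ring
              simp only [hpre1, hpre2, Prod.mk.injEq]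
              exact ⟨trivial, by rw [hamt]⟩

theorem prefGo_getD_length (FB : List Int) :
    (prefGo 0 FB).getD FB.length 0 = FB.sum := by
  rw [prefGo_getD FB 0 FB.length le_rfl, List.take_length]
  ring

-- ===== VERDICT =====
theorem count_pond_spec : Claim_equal_count_pond := by
  intro FB _
  unfold Spec_count_pond count_pond count_pond_alt
  obtain ⟨b, a, h⟩ := (pond_fold_char FB.length FB le_rfl).1 0 0 0 []
  simp only [h]
  rw [← idxFrom_zero FB (fun x => x ≠ 0), ← idxFrom_zero FB (fun x => x = 1),
    pondLoop_eq_pondScan FB FB.length 0 0 (by omega) le_rfl, prefGo_getD_length]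
  simp
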